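-- pv_equiv track=rewrite | github.com/tangledsnakes24/schoolpy | Python Classwork/addevens.py | morewierdsums
-- ===== SOURCE A (Python) =====
-- def morewierdsums(n):
--     counter4 = 0
--     for number in range(1, n+1):
--         if(number % 4) == 1 or (number % 4) == 2:
--             counter4 = counter4 + number
--         if(number % 4) == 3 or (number % 4) == 0:
--             counter4 = counter4 - number
--     return(counter4)
-- ===== SOURCE B (Python) =====
-- def morewierdsums(n):
--     # Closed form: each complete block of 4 (k+1)+(k+2)-(k+3)-(k+4) contributes -4.
--     if n <= 0:
--         return 0
--     r = n % 4
--     if r == 0: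
--         return -n
--     if r == 1:
--         return 1
--     if r == 2:
--         return n + 1
--     return 0
-- ===== Notes on version B (the rewrite author's own statement) =====
-- stated objective: faster
-- what changed: Replaces the linear loop over range(1,n+1) by a constant-time closed form determined by n mod 4.
import Mathlib
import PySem

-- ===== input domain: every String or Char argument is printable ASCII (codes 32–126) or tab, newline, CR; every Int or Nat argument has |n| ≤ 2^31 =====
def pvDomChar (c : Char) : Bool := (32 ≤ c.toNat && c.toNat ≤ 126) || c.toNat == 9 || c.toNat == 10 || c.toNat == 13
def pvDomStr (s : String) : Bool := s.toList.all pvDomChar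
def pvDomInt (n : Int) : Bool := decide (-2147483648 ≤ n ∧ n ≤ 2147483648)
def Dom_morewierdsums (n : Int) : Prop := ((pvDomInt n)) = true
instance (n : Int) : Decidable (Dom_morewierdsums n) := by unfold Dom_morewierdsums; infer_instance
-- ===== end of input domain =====

-- B replaces A's O(n) loop with an O(1) closed form based on n mod 4.


-- ===== PORT A =====
def morewierdsums (n : Int) : Int :=
  (PySem.List.pyRange 1 (n+1) 1).foldl (fun counter4 number =>
    let counter4 :=
      if PySem.Int.mod number 4 == 1 || PySem.Int.mod number 4 == 2 then counter4 + number
      else counter4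
    if PySem.Int.mod number 4 == 3 || PySem.Int.mod number 4 == 0 then counter4 - number
    else counter4) 0

-- ===== PORT B =====
def morewierdsums_alt (n : Int) : Int :=
  if n ≤ 0 then 0
  else
    let r := PySem.Int.mod n 4
    if r = 0 then -n
    else if r = 1 then 1
    else if r = 2 then n + 1
    else 0

-- ===== PRECONDITION & SPEC =====
def Spec_morewierdsums (n : Int) (out : Int) : Prop := out = morewierdsums_alt n
instance (n : Int) (out : Int) : Decidable (Spec_morewierdsums n out) := by unfold Spec_morewierdsums; infer_instance

-- ===== CLAIM (what is proved, stated in full; the proofs are below) =====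
def Claim_equal_morewierdsums : Prop := ∀ (n : Int), Dom_morewierdsums n → Spec_morewierdsums n (morewierdsums n)

-- ===== LEMMAS AND PROOFS =====

theorem morewierdsums_nat (k : Nat) : morewierdsums (k : Int) = morewierdsums_alt (k : Int) := by
  induction k with
  | zero => decide
  | succ m ih =>
      have hsplit : PySem.List.pyRange 1 ((m : Int) + 1 + 1) 1
          = PySem.List.pyRange 1 ((m : Int) + 1) 1 ++ [(m : Int) + 1] :=
        PySem.List.pyRange_one_succ_right (by omega)
      unfold morewierdsums at ih ⊢
      push_cast
      rw [hsplit, List.foldl_append]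
      simp only [List.foldl]
      rw [ih]
      unfold morewierdsums_alt
      simp only [PySem.Int.mod]
      have h4 : ((m : Int) + 1) % 4 = 0 ∨ ((m : Int) + 1) % 4 = 1
          ∨ ((m : Int) + 1) % 4 = 2 ∨ ((m : Int) + 1) % 4 = 3 := by omega
      have hm4 : (m : Int) % 4 = 0 ∨ (m : Int) % 4 = 1
          ∨ (m : Int) % 4 = 2 ∨ (m : Int) % 4 = 3 := by omega
      have e1 : ((m : Int) + 1).fmod 4 = ((m : Int) + 1) % 4 := by
        simp [Int.fmod_eq_emod]
      have e2 : ((m : Int)).fmod 4 = (m : Int) % 4 := by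
        simp [Int.fmod_eq_emod]
      simp only [e1, e2]
      rcases h4 with h | h | h | h <;> rcases hm4 with h' | h' | h' | h' <;>
        simp only [h, h'] <;> norm_num <;> omega

theorem morewierdsums_neg (n : Int) (h : n ≤ 0) : morewierdsums n = morewierdsums_alt n := by
  unfold morewierdsums morewierdsums_alt
  rw [PySem.List.pyRange_one_eq_nil (by omega)]
  simp [h]

-- ===== VERDICT (by name: the statement is the Claim_ definition above) =====
theorem morewierdsums_spec : Claim_equal_morewierdsums := by
  intro n _
  unfold Spec_morewierdsums
  rcases le_or_gt n 0 with h | h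
  · exact morewierdsums_neg n h
  · obtain ⟨k, rfl⟩ : ∃ k : Nat, n = (k : Int) := ⟨n.toNat, by omega⟩
    exact morewierdsums_nat k
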